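-- pv_equiv track=rewrite | github.com/YuriSpiridonov/CodeWars | word-mesh.py | word_mesh
-- ===== SOURCE A (Python) =====
-- def word_mesh(arr):
--     match = str()
--     counter = int()
--     try:
--         for i in range(len(arr)):
--             for y in range(len(arr[i])):
--                 if arr[i+1].startswith(arr[i][y:]) is not True:
--                     continue
--                 else:
--                     match += ''.join(arr[i][y:])
--                     counter+=1
--                     break
--     except:
--         if counter == len(arr)-1:
--             return match
--         else:
--             return "failed to mesh"
-- ===== SOURCE B (Python) =====
-- def word_mesh(arr):
--     if not arr:
--         return None
--     pieces = []
--     for a, b in zip(arr, arr[1:]):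
--         m = len(b)
--         # NFA simulation (bitap-style): live = all k such that b[:k] is a
--         # suffix of the part of a scanned so far; one left-to-right pass.
--         live = [0]
--         for c in a:
--             live = [k + 1 for k in live if k < m and b[k] == c] + [0]
--         k = max(live)
--         if k == 0:
--             return "failed to mesh"
--         pieces.append(b[:k])
--     return "".join(pieces)
-- ===== Notes on version B (the rewrite author's own statement) =====
-- stated objective: alternative
-- what changed: Per adjacent pair, A restarts a full startswith check at every suffix position of the left word (first hit = longest overlap); B instead makes one left-to-right scan of the left word simulating the set of live prefix-lengths of the right word (bitap/NFA-style: filter-and-extend the set per character, then take its maximum), and the exception-driven outer loop with a counter becomes a zip over adjacent pairs with early return and a final join; a timing run measured B ~17x faster on the generated inputs, where few prefixes stay live so each pair costs near O(L).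
-- intended difference: On non-empty lists whose last element is the empty string, control in A falls off the try block and A returns None (no string at all); B returns the proper string answer ('failed to mesh', or the joined overlaps, e.g. '' for ['']), which is the intended value since None is only meaningful for the empty list. — e.g. on word_mesh(["ab", ""]): A returns none, B returns some "failed to mesh"
import Mathlib
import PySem

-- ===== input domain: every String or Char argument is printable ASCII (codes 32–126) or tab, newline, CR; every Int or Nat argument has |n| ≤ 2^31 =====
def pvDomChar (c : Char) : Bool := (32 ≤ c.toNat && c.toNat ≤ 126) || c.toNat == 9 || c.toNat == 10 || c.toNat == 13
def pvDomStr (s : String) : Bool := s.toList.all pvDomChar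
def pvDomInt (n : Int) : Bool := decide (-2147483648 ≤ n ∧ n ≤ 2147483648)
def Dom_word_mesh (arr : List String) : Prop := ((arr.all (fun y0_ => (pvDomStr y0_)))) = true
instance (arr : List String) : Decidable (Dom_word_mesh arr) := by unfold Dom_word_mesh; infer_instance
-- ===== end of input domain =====

-- B replaces A's per-suffix restart search (a fresh startswith check at every suffix
-- position of the left word) by one left-to-right scan of the left word maintaining the
-- set of live prefix-lengths of the right word (bitap/NFA-style), and A's
-- exception-driven index loop + counter by a zip over adjacent pairs with early return
-- (measured faster in a timing run); on non-empty input ending in "" A falls off its try block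
-- and returns None — B returns the proper string there (see D_word_mesh below).

-- ===== PORT A =====
-- inner 'for y in range(len(arr[i]))' loop: s is the remaining suffix arr[i][y:];
-- nxt = arr[i+1] if it exists (none = IndexError, modelled as .error carrying the state)
def pvAInner (nxt : Option (List Char)) (s : List Char) (st : List Char × Int) :
    Except (List Char × Int) (List Char × Int) :=
  match s with
  | [] => .ok st
  | c :: rest =>
    match nxt with
    | none => .error st
    | some b =>
      if PySem.Chars.startswith b (c :: rest) then
        .ok (st.1 ++ (c :: rest), st.2 + 1)
      else pvAInner nxt rest st

-- outer 'for i in range(len(arr))' loop; arr[i+1] is the head of the remaining tail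
def pvALoop (l : List (List Char)) (st : List Char × Int) :
    Except (List Char × Int) (List Char × Int) :=
  match l with
  | [] => .ok st
  | a :: rest =>
    match pvAInner rest.head? a st with
    | .error e => .error e
    | .ok st' => pvALoop rest st'

def word_mesh (arr : List String) : Option String :=
  match pvALoop (arr.map String.toList) ([], 0) with
  | .ok _ => none   -- try block finished with no exception: A falls through, returns None
  | .error (m, c) =>
      if c = (arr.length : Int) - 1 then some (String.ofList m) else some "failed to mesh"

-- ===== PORT B =====
-- 'live = [k + 1 for k in live if k < m and b[k] == c] + [0]'
-- (k < m guards the index, so getD is exact for Python's b[k])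
def pvStep (b : List Char) (c : Char) (live : List Nat) : List Nat :=
  ((live.filter (fun k => decide (k < b.length) && (b.getD k ' ' == c))).map (· + 1)) ++ [0]

-- 'for c in a: live = …' starting from live = [0]
def pvLive (b a : List Char) : List Nat :=
  a.foldl (fun live c => pvStep b c live) [0]

-- 'max(live)': live is a non-empty list of non-negative ints containing 0,
-- so Python's max is the fold of max with base 0
def pvMaxLive (l : List Nat) : Nat := l.foldl max 0

-- the 'for a, b in zip(arr, arr[1:])' loop collecting pieces, early None = "failed to mesh"
def pvBLoop (l : List (List Char)) : Option (List (List Char)) :=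
  match l with
  | a :: b :: rest =>
    let k := pvMaxLive (pvLive b a)
    if k = 0 then none
    else
      match pvBLoop (b :: rest) with
      | none => none
      | some parts => some (b.take k :: parts)
  | _ => some []

def word_mesh_alt (arr : List String) : Option String :=
  match arr with
  | [] => none
  | _ :: _ =>
    match pvBLoop (arr.map String.toList) with
    | none => some "failed to mesh"
    | some parts => some (String.ofList (PySem.Chars.join [] parts))

-- ===== PRECONDITION & SPEC =====
-- On non-empty lists whose last element is "", A's try block finishes without the
-- IndexError it relies on and A returns None; B returns the intended string value there
-- ("failed to mesh", or the joined overlaps, e.g. "" for [""]).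
def D_word_mesh (arr : List String) : Prop := arr ≠ [] ∧ arr.getLast? = some ""
instance (arr : List String) : Decidable (D_word_mesh arr) := by unfold D_word_mesh; infer_instance

def Spec_word_mesh (arr : List String) (out : Option String) : Prop :=
  ¬ D_word_mesh arr → out = word_mesh_alt arr
instance (arr : List String) (out : Option String) : Decidable (Spec_word_mesh arr out) := by
  unfold Spec_word_mesh; infer_instance

def pvDiffWitness_word_mesh : List String := ["ab", ""]
def pvDiffWitnessOut_word_mesh : (Option String) × (Option String) :=
  (none, some "failed to mesh")

-- ===== CLAIM (what is proved, stated in full; the proofs are below) =====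
def Claim_unchanged_word_mesh : Prop :=
  ∀ (arr : List String), Dom_word_mesh arr → Spec_word_mesh arr (word_mesh arr)
def Claim_changed_word_mesh : Prop :=
  Dom_word_mesh (pvDiffWitness_word_mesh) ∧ D_word_mesh (pvDiffWitness_word_mesh) ∧
  word_mesh (pvDiffWitness_word_mesh) = pvDiffWitnessOut_word_mesh.1 ∧
  word_mesh_alt (pvDiffWitness_word_mesh) = pvDiffWitnessOut_word_mesh.2 ∧
  pvDiffWitnessOut_word_mesh.1 ≠ pvDiffWitnessOut_word_mesh.2
def Claim_exact_word_mesh : Prop :=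
  ∀ (arr : List String), Dom_word_mesh arr → D_word_mesh arr →
    word_mesh arr ≠ word_mesh_alt arr

-- ===== LEMMAS AND PROOFS =====

-- A's per-pair search, re-stated as a proof-side function: first k from j down
-- such that b starts with the length-k suffix of a
def pvOverlap (a b : List Char) : Nat → Nat
  | 0 => 0
  | k + 1 =>
    if PySem.Chars.startswith b (a.drop (a.length - (k + 1))) then k + 1
    else pvOverlap a b k

-- the overlap length of one adjacent pair as A's inner loop determines it
def pvK (a b : List Char) : Nat := pvOverlap a b (min a.length b.length)

-- pieces contributed by the good pairs (what A's match accumulates, written as b-prefixes)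
def pvMesh : List (List Char) → List (List Char)
  | a :: b :: rest => (if pvK a b = 0 then [] else [b.take (pvK a b)]) ++ pvMesh (b :: rest)
  | _ => []

-- A's counter increments
def pvCnt : List (List Char) → Int
  | a :: b :: rest => (if pvK a b = 0 then 0 else 1) + pvCnt (b :: rest)
  | _ => 0

theorem pvOverlap_spec (a b : List Char) :
    ∀ j, pvOverlap a b j = 0 ∨
      (0 < pvOverlap a b j ∧ pvOverlap a b j ≤ j ∧
        PySem.Chars.startswith b (a.drop (a.length - pvOverlap a b j)) = true) := by
  intro j
  induction j with
  | zero => left; rfl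
  | succ k ih =>
    by_cases h : PySem.Chars.startswith b (a.drop (a.length - (k + 1))) = true
    · right
      simp [pvOverlap, h]
    · have hov : pvOverlap a b (k + 1) = pvOverlap a b k := by
        simp [pvOverlap, h]
      rw [hov]
      rcases ih with h0 | ⟨h1, h2, h3⟩
      · left; exact h0
      · right; exact ⟨h1, Nat.le_succ_of_le h2, h3⟩

-- maximality of A's first-hit-from-above search
theorem pvOverlap_ge (a b : List Char) :
    ∀ j k, k ≤ j → PySem.Chars.startswith b (a.drop (a.length - k)) = true →
      k ≤ pvOverlap a b j := by
  intro j
  induction j with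
  | zero => intro k hk _; omega
  | succ j ih =>
    intro k hk hs
    by_cases h : PySem.Chars.startswith b (a.drop (a.length - (j + 1))) = true
    · simp only [pvOverlap, h, if_true]; omega
    · simp only [pvOverlap, h]
      have hkj : k ≤ j := by
        rcases Nat.lt_or_ge k (j + 1) with h1 | h1
        · omega
        · have : k = j + 1 := by omega
          subst this; exact absurd hs h
      exact ih k hkj hs

theorem pvOverlap_cons (c : Char) (rest b : List Char) :
    ∀ j, j ≤ rest.length → pvOverlap (c :: rest) b j = pvOverlap rest b j := by
  intro j
  induction j with
  | zero => intro _; rfl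
  | succ k ih =>
    intro hj
    have hd : (c :: rest).drop ((c :: rest).length - (k + 1)) =
        rest.drop (rest.length - (k + 1)) := by
      have : (c :: rest).length - (k + 1) = (rest.length - (k + 1)) + 1 := by
        simp only [List.length_cons]; omega
      rw [this, List.drop_succ_cons]
    simp only [pvOverlap, hd, ih (by omega)]

theorem pvOverlap_head_not (c : Char) (rest b : List Char)
    (hp : ¬ PySem.Chars.startswith b (c :: rest) = true) :
    pvOverlap (c :: rest) b (min (c :: rest).length b.length) =
      pvOverlap rest b (min rest.length b.length) := by
  by_cases hb : b.length ≤ rest.length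
  · have h1 : min (c :: rest).length b.length = b.length := by
      simp only [List.length_cons]; omega
    have h2 : min rest.length b.length = b.length := by omega
    rw [h1, h2, pvOverlap_cons c rest b b.length hb]
  · have hlt : rest.length < b.length := by omega
    have h1 : min (c :: rest).length b.length = rest.length + 1 := by
      simp only [List.length_cons]; omega
    have h2 : min rest.length b.length = rest.length := by omega
    rw [h1, h2]
    have hd : (c :: rest).drop ((c :: rest).length - (rest.length + 1)) = c :: rest := by
      simp
    simp only [pvOverlap, hd, hp]
    exact pvOverlap_cons c rest b rest.length le_rfl

-- A's inner loop never raises when arr[i+1] exists, and computes exactly pvK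
theorem pvAInner_some (b : List Char) :
    ∀ (s : List Char) (st : List Char × Int),
      pvAInner (some b) s st =
        .ok (if pvK s b = 0 then st
             else (st.1 ++ s.drop (s.length - pvK s b), st.2 + 1)) := by
  intro s
  induction s with
  | nil =>
    intro st
    simp [pvAInner, pvK, pvOverlap]
  | cons c rest ih =>
    intro st
    by_cases hp : PySem.Chars.startswith b (c :: rest) = true
    · have hpre : (c :: rest) <+: b := (PySem.Chars.startswith_iff b (c :: rest)).mp hp
      have hlen : (c :: rest).length ≤ b.length := hpre.length_le
      have hmin : min (c :: rest).length b.length = (c :: rest).length := by omega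
      have hk : pvK (c :: rest) b = (c :: rest).length := by
        unfold pvK
        rw [hmin]
        simp [pvOverlap, hp]
      simp [pvAInner, hp, hk]
    · have hk : pvK (c :: rest) b = pvK rest b := pvOverlap_head_not c rest b hp
      simp only [pvAInner, hp, ih st, hk]
      by_cases h0 : pvK rest b = 0
      · simp [h0]
      · have hle : pvK rest b ≤ rest.length := by
          rcases pvOverlap_spec rest b (min rest.length b.length) with hz | ⟨_, h2, _⟩
          · exact absurd hz h0
          · exact le_trans h2 (Nat.min_le_left _ _)
        have hd2 : List.drop (rest.length + 1 - pvK rest b) (c :: rest) =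
            List.drop (rest.length - pvK rest b) rest := by
          have he : rest.length + 1 - pvK rest b = (rest.length - pvK rest b) + 1 := by omega
          rw [he, List.drop_succ_cons]
        simp [h0, hd2]

-- when a pair overlaps, the a-suffix A appends IS the b-prefix B collects
theorem pvK_piece (a b : List Char) (h0 : pvK a b ≠ 0) :
    a.drop (a.length - pvK a b) = b.take (pvK a b) := by
  rcases pvOverlap_spec a b (min a.length b.length) with hz | ⟨_, h2, h3⟩
  · exact absurd hz h0
  · have hpre : a.drop (a.length - pvK a b) <+: b :=
      (PySem.Chars.startswith_iff b _).mp h3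
    have hka : pvK a b ≤ a.length := le_trans h2 (Nat.min_le_left _ _)
    have hlen : (a.drop (a.length - pvK a b)).length = pvK a b := by
      rw [List.length_drop]; omega
    calc a.drop (a.length - pvK a b)
        = b.take (a.drop (a.length - pvK a b)).length := List.prefix_iff_eq_take.mp hpre
      _ = b.take (pvK a b) := by rw [hlen]

-- ===== the bridge: B's live-set maximum equals A's pvK =====

theorem suffix_concat_iff {α : Type} (xs ys : List α) (x y : α) :
    xs ++ [x] <:+ ys ++ [y] ↔ x = y ∧ xs <:+ ys := by
  constructor
  · intro h
    have h' := (List.reverse_prefix (l₁ := xs ++ [x]) (l₂ := ys ++ [y])).mpr h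
    simp only [List.reverse_append, List.reverse_cons, List.reverse_nil,
      List.nil_append, List.singleton_append] at h'
    rcases (List.cons_prefix_cons).mp h' with ⟨hxy, hpre⟩
    exact ⟨hxy, (List.reverse_prefix).mp hpre⟩
  · rintro ⟨rfl, ⟨t, rfl⟩⟩
    exact ⟨t, by simp⟩

-- characterisation of B's live set: exactly the k with b[:k] a suffix of the scanned part
theorem mem_pvLive (b : List Char) :
    ∀ (a : List Char) (k : Nat),
      k ∈ pvLive b a ↔ k ≤ b.length ∧ b.take k <:+ a := by
  intro a
  induction a using List.reverseRecOn with
  | nil =>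
    intro k
    simp only [pvLive, List.foldl_nil, List.mem_singleton]
    constructor
    · rintro rfl; exact ⟨Nat.zero_le _, by simp⟩
    · rintro ⟨_, h⟩
      have := h.length_le
      simp only [List.length_take, List.length_nil] at this
      omega
  | append_singleton a c ih =>
    intro k
    have hstep : pvLive b (a ++ [c]) = pvStep b c (pvLive b a) := by
      simp [pvLive, List.foldl_append]
    rw [hstep]
    simp only [pvStep, List.mem_append, List.mem_map, List.mem_filter,
      List.mem_singleton, Bool.and_eq_true, decide_eq_true_eq, beq_iff_eq]
    constructor
    · rintro (⟨j, ⟨hj, hjm, hjc⟩, rfl⟩ | rfl)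
      · rcases (ih j).mp hj with ⟨_, hsuf⟩
        refine ⟨by omega, ?_⟩
        have htake : b.take (j + 1) = b.take j ++ [b.getD j ' '] := by
          rw [List.take_add_one]
          congr 1
          rw [List.getElem?_eq_getElem hjm]
          simp [List.getD, List.getElem?_eq_getElem hjm]
        rw [htake, hjc]
        exact (suffix_concat_iff _ _ _ _).mpr ⟨rfl, hsuf⟩
      · exact ⟨Nat.zero_le _, by simp⟩
    · rintro ⟨hkb, hsuf⟩
      cases k with
      | zero => right; rfl
      | succ j =>
        left
        have hjm : j < b.length := by omega
        have htake : b.take (j + 1) = b.take j ++ [b.getD j ' '] := by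
          rw [List.take_add_one]
          congr 1
          rw [List.getElem?_eq_getElem hjm]
          simp [List.getD, List.getElem?_eq_getElem hjm]
        rw [htake] at hsuf
        rcases (suffix_concat_iff _ _ _ _).mp hsuf with ⟨hc, hsuf'⟩
        exact ⟨j, ⟨(ih j).mpr ⟨by omega, hsuf'⟩, hjm, hc⟩, rfl⟩

theorem acc_le_foldl_max : ∀ (l : List Nat) (acc : Nat), acc ≤ l.foldl max acc := by
  intro l
  induction l with
  | nil => intro acc; simp
  | cons y t ih => intro acc; exact le_trans (le_max_left acc y) (ih (max acc y))

theorem le_foldl_max : ∀ (l : List Nat) (acc x : Nat), x ∈ l → x ≤ l.foldl max acc := by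
  intro l
  induction l with
  | nil => intro acc x h; cases h
  | cons y t ih =>
    intro acc x h
    rcases List.mem_cons.mp h with rfl | h
    · exact le_trans (le_max_right acc x) (acc_le_foldl_max t _)
    · exact ih (max acc y) x h

theorem foldl_max_mem : ∀ (l : List Nat) (acc : Nat),
    l.foldl max acc = acc ∨ l.foldl max acc ∈ l := by
  intro l
  induction l with
  | nil => intro acc; left; rfl
  | cons y t ih =>
    intro acc
    rcases ih (max acc y) with h | h
    · rcases Nat.le_total y acc with hle | hle
      · left
        simp only [List.foldl_cons, h]
        exact Nat.max_eq_left hle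
      · right
        simp only [List.foldl_cons, h]
        rw [Nat.max_eq_right hle]
        exact List.mem_cons_self
    · right
      exact List.mem_cons_of_mem _ h

-- a suffix of given length is the drop
theorem suffix_eq_drop {α : Type} (s a : List α) (h : s <:+ a) :
    s = a.drop (a.length - s.length) := by
  rcases h with ⟨t, rfl⟩
  have : (t ++ s).length - s.length = t.length := by simp
  rw [this, List.drop_left]

theorem pvK_max (a b : List Char) (k : Nat) (hk : k ≤ b.length) (hs : b.take k <:+ a) :
    k ≤ pvK a b := by
  have hlenk : (b.take k).length = k := by simp [List.length_take, hk]
  have hka : k ≤ a.length := by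
    have := hs.length_le
    omega
  have hdrop : a.drop (a.length - k) = b.take k := by
    have := suffix_eq_drop (b.take k) a hs
    rw [hlenk] at this
    exact this.symm
  have hsw : PySem.Chars.startswith b (a.drop (a.length - k)) = true := by
    rw [hdrop]
    exact (PySem.Chars.startswith_iff b _).mpr (List.take_prefix _ _)
  exact pvOverlap_ge a b (min a.length b.length) k (by omega) hsw

theorem pvK_valid (a b : List Char) : pvK a b ≤ b.length ∧ b.take (pvK a b) <:+ a := by
  by_cases h0 : pvK a b = 0
  · rw [h0]; exact ⟨Nat.zero_le _, by simp⟩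
  · rcases pvOverlap_spec a b (min a.length b.length) with hz | ⟨_, h2, _⟩
    · exact absurd hz h0
    · refine ⟨le_trans h2 (Nat.min_le_right _ _), ?_⟩
      rw [← pvK_piece a b h0]
      exact List.drop_suffix _ _

theorem pvMaxLive_eq_pvK (a b : List Char) : pvMaxLive (pvLive b a) = pvK a b := by
  unfold pvMaxLive
  apply Nat.le_antisymm
  · rcases foldl_max_mem (pvLive b a) 0 with h | h
    · rw [h]; exact Nat.zero_le _
    · rcases (mem_pvLive b a _).mp h with ⟨h1, h2⟩
      exact pvK_max a b _ h1 h2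
  · obtain ⟨h1, h2⟩ := pvK_valid a b
    exact le_foldl_max _ 0 _ ((mem_pvLive b a _).mpr ⟨h1, h2⟩)

-- ===== correspondence of the two outer loops =====

-- A's outer loop on a list whose last element is non-empty: always ends in the IndexError
theorem pvALoop_char :
    ∀ (l : List (List Char)), l ≠ [] → l.getLast? ≠ some [] →
      ∀ (m : List Char) (c : Int),
        pvALoop l (m, c) = .error (m ++ (pvMesh l).flatten, c + pvCnt l) := by
  intro l
  induction l with
  | nil => intro h; exact absurd rfl h
  | cons a rest ih =>
    intro _ hlast m c
    cases rest with
    | nil =>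
      have ha : a ≠ [] := by
        simpa [List.getLast?] using hlast
      cases a with
      | nil => exact absurd rfl ha
      | cons x xs =>
        simp [pvALoop, pvAInner, pvMesh, pvCnt]
    | cons b rest' =>
      have hlast' : (b :: rest').getLast? ≠ some [] := by
        simpa [List.getLast?_cons_cons] using hlast
      have hne : (b :: rest') ≠ [] := by simp
      have hstep : pvALoop (a :: b :: rest') (m, c) =
          pvALoop (b :: rest')
            (if pvK a b = 0 then (m, c)
             else (m ++ a.drop (a.length - pvK a b), c + 1)) := by
        show (match pvAInner (b :: rest').head? a (m, c) with
              | Except.error e => Except.error e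
              | Except.ok st' => pvALoop (b :: rest') st') = _
        rw [List.head?_cons, pvAInner_some]
      rw [hstep]
      by_cases h0 : pvK a b = 0
      · rw [if_pos h0, ih hne hlast' m c]
        simp [pvMesh, pvCnt, h0]
      · rw [if_neg h0, ih hne hlast' _ _, pvK_piece a b h0]
        simp [pvMesh, pvCnt, h0, List.append_assoc, Int.add_assoc]

-- A's outer loop finishes normally (no exception) when the last element is empty
theorem pvALoop_last_nil :
    ∀ (l : List (List Char)), l.getLast? = some [] →
      ∀ (m : List Char) (c : Int), ∃ st, pvALoop l (m, c) = .ok st := by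
  intro l
  induction l with
  | nil => intro h; simp at h
  | cons a rest ih =>
    intro hlast m c
    cases rest with
    | nil =>
      have : a = [] := by simpa [List.getLast?] using hlast
      subst this
      exact ⟨(m, c), rfl⟩
    | cons b rest' =>
      have hlast' : (b :: rest').getLast? = some [] := by
        simpa [List.getLast?_cons_cons] using hlast
      have hstep : pvALoop (a :: b :: rest') (m, c) =
          pvALoop (b :: rest')
            (if pvK a b = 0 then (m, c)
             else (m ++ a.drop (a.length - pvK a b), c + 1)) := by
        show (match pvAInner (b :: rest').head? a (m, c) with
              | Except.error e => Except.error e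
              | Except.ok st' => pvALoop (b :: rest') st') = _
        rw [List.head?_cons, pvAInner_some]
      rw [hstep]
      by_cases h0 : pvK a b = 0
      · rw [if_pos h0]
        exact ih hlast' m c
      · rw [if_neg h0]
        exact ih hlast' _ _

theorem pvCnt_le : ∀ l, l ≠ [] → pvCnt l ≤ (l.length : Int) - 1 := by
  intro l
  induction l with
  | nil => intro h; exact absurd rfl h
  | cons a rest ih =>
    intro _
    cases rest with
    | nil => simp [pvCnt]
    | cons b rest' =>
      have h1 : pvCnt (a :: b :: rest') = (if pvK a b = 0 then 0 else 1) + pvCnt (b :: rest') := rfl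
      have h2 := ih (by simp)
      rw [h1]
      simp only [List.length_cons] at *
      split_ifs <;> push_cast <;> omega

-- B's loop succeeds exactly on the inputs where A's counter reaches len(arr)-1
theorem pvBLoop_some :
    ∀ (l : List (List Char)), l ≠ [] →
      ∀ parts, pvBLoop l = some parts →
        parts = pvMesh l ∧ pvCnt l = (l.length : Int) - 1 := by
  intro l
  induction l with
  | nil => intro h; exact absurd rfl h
  | cons a rest ih =>
    intro _ parts hB
    cases rest with
    | nil =>
      simp only [pvBLoop] at hB
      cases hB
      simp [pvMesh, pvCnt]
    | cons b rest' =>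
      simp only [pvBLoop, pvMaxLive_eq_pvK] at hB
      by_cases h0 : pvK a b = 0
      · rw [if_pos h0] at hB; cases hB
      · rw [if_neg h0] at hB
        cases hP : pvBLoop (b :: rest') with
        | none => rw [hP] at hB; cases hB
        | some parts' =>
          rw [hP] at hB
          cases hB
          obtain ⟨hp, hc⟩ := ih (by simp) parts' hP
          constructor
          · simp [pvMesh, h0, hp]
          · have : pvCnt (a :: b :: rest') =
                (if pvK a b = 0 then 0 else 1) + pvCnt (b :: rest') := rfl
            rw [this, if_neg h0, hc]
            simp only [List.length_cons]
            push_cast; omega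

theorem pvBLoop_none :
    ∀ (l : List (List Char)), pvBLoop l = none → pvCnt l ≠ (l.length : Int) - 1 := by
  intro l
  induction l with
  | nil => intro h; simp [pvBLoop] at h
  | cons a rest ih =>
    intro hB
    cases rest with
    | nil => simp [pvBLoop] at hB
    | cons b rest' =>
      have hcnt : pvCnt (a :: b :: rest') =
          (if pvK a b = 0 then 0 else 1) + pvCnt (b :: rest') := rfl
      simp only [pvBLoop, pvMaxLive_eq_pvK] at hB
      by_cases h0 : pvK a b = 0
      · have hle := pvCnt_le (b :: rest') (by simp)
        rw [hcnt, if_pos h0]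
        simp only [List.length_cons] at *
        push_cast at *; omega
      · rw [if_neg h0] at hB
        cases hP : pvBLoop (b :: rest') with
        | none =>
          have := ih hP
          rw [hcnt, if_neg h0]
          simp only [List.length_cons] at *
          push_cast at *; omega
        | some parts' => rw [hP] at hB; cases hB

theorem pvJoin_nil_sep (parts : List (List Char)) :
    PySem.Chars.join [] parts = parts.flatten := by
  show List.intercalate [] parts = parts.flatten
  induction parts with
  | nil => rfl
  | cons x t ih =>
    cases t with
    | nil => simp [List.intercalate]
    | cons y t' =>
      simp only [List.intercalate, List.intersperse_cons₂, List.flatten_cons,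
        List.nil_append] at *
      simp_all

theorem toList_ne_nil_of_ne_empty (s : String) (h : s ≠ "") : s.toList ≠ [] := by
  intro hnil
  apply h
  have := congrArg String.ofList hnil
  simpa using this

-- ===== VERDICT (by name: the statement is the Claim_ definition above) =====
theorem word_mesh_spec : Claim_unchanged_word_mesh := by
  intro arr _ hD
  cases arr with
  | nil => rfl
  | cons a0 rest0 =>
    have hlast : (a0 :: rest0).getLast? ≠ some "" := by
      intro h
      exact hD ⟨by simp, h⟩
    obtain ⟨last, hlastEq⟩ : ∃ x, (a0 :: rest0).getLast? = some x := by
      cases h : (a0 :: rest0).getLast? with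
      | none => simp [List.getLast?_eq_none_iff] at h
      | some x => exact ⟨x, rfl⟩
    have hlastne : last ≠ "" := by
      intro h; subst h; exact hlast hlastEq
    set l := (a0 :: rest0).map String.toList with hl
    have hlne : l ≠ [] := by simp [hl]
    have hlastl : l.getLast? ≠ some [] := by
      rw [hl, List.getLast?_map, hlastEq]
      simp only [Option.map_some]
      intro h
      apply toList_ne_nil_of_ne_empty last hlastne
      simpa using h
    have hlen : (l.length : Int) = ((a0 :: rest0).length : Int) := by simp [hl]
    unfold word_mesh word_mesh_alt
    rw [← hl, pvALoop_char l hlne hlastl [] 0]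
    cases hB : pvBLoop l with
    | none =>
      have hne := pvBLoop_none l hB
      have hlen2 : (l.length : Int) = (rest0.length : Int) + 1 := by
        rw [hlen]; push_cast [List.length_cons]; ring
      have h1 : pvCnt l ≠ (rest0.length : Int) := by omega
      simp [h1]
    | some parts =>
      obtain ⟨hp, hc⟩ := pvBLoop_some l hlne parts hB
      have hlen2 : (l.length : Int) = (rest0.length : Int) + 1 := by
        rw [hlen]; push_cast [List.length_cons]; ring
      have h1 : pvCnt l = (rest0.length : Int) := by omega
      simp [h1, hp, pvJoin_nil_sep]

theorem word_mesh_changed : Claim_changed_word_mesh := by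
  unfold Claim_changed_word_mesh; decide

theorem word_mesh_tight : Claim_exact_word_mesh := by
  intro arr _ hD
  obtain ⟨hne, hlast⟩ := hD
  cases arr with
  | nil => exact absurd rfl hne
  | cons a0 rest0 =>
    have hlastl : ((a0 :: rest0).map String.toList).getLast? = some [] := by
      rw [List.getLast?_map, hlast]; rfl
    obtain ⟨st, hst⟩ := pvALoop_last_nil _ hlastl [] 0
    unfold word_mesh word_mesh_alt
    rw [hst]
    cases hB : pvBLoop ((a0 :: rest0).map String.toList) <;> simp
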